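-- pv_equiv track=rewrite | github.com/superkerokero/LibraryDataAnalysisScripts | excel2Graph.py | createEdgeListFromRaw
-- ===== SOURCE A (Python) =====
-- def createEdgeListFromRaw(raw):
--     "Generate edge list from raw edge list."
--     edges = dict()
--     for data in raw.values():
--         if len(data) > 1:
--             for i in range(len(data)):
--                 for j in range(i, len(data)):
--                     try:
--                         edges[(data[i], data[j])]["weight"] += 1
--                     except KeyError:
--                         edges[(data[i], data[j])] = dict()
--                         edges[(data[i], data[j])]["weight"] = 1
--     return edges
-- ===== SOURCE B (Python) =====
-- def createEdgeListFromRaw(raw):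
--     "Generate edge list from raw edge list."
--     # Phase 1: flatten everything into one flat list of pair keys, peeling
--     # suffixes of each qualifying group (no index arithmetic, no counting here).
--     keys = []
--     for data in raw.values():
--         if len(data) > 1:
--             suffix = data
--             while suffix:
--                 head = suffix[0]
--                 for y in suffix:
--                     keys.append((head, y))
--                 suffix = suffix[1:]
--     # Phase 2: tally the flat key stream.
--     counts = {}
--     for k in keys:
--         counts[k] = counts.get(k, 0) + 1
--     # Phase 3: materialize the nested {'weight': n} dicts.
--     return {k: {"weight": n} for k, n in counts.items()}
-- ===== Notes on version B (the rewrite author's own statement) =====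
-- stated objective: alternative
-- what changed: Replaces A's fused nested index loops with try/except nested-dict increments by a three-stage pipeline: flatten all pair keys by suffix peeling (head paired with every element of each suffix), then one flat tally pass into an int counter dict, then a materialize pass building the {'weight': n} dicts.
import Mathlib
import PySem

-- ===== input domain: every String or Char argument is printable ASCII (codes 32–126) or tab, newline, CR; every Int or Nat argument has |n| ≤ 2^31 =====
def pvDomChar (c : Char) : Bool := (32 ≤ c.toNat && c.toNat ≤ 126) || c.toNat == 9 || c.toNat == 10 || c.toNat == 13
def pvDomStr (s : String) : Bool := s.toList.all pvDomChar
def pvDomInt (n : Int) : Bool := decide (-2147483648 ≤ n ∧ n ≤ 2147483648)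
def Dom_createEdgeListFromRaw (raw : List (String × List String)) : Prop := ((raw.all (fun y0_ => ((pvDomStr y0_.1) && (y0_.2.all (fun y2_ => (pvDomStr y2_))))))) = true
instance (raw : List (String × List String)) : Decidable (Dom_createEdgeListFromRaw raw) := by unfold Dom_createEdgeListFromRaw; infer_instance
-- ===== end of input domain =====

-- B replaces A's fused nested index loops + try/except by a three-stage pipeline
-- (flatten pair keys by suffix peeling, one flat tally pass, materialize) — an alternative decomposition.


-- ===== PORT A =====
def createEdgeListFromRaw (raw : List (String × List String)) : List (String × String × List (String × Int)) :=
  let edges : PySem.Dict (String × String) (PySem.Dict String Int) :=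
    raw.foldl (fun edges p =>
      let data := p.2
      if PySem.List.len data > 1 then
        (PySem.List.pyRange 0 (PySem.List.len data) 1).foldl (fun edges i =>
          (PySem.List.pyRange i (PySem.List.len data) 1).foldl (fun edges j =>
            let key := (PySem.List.pyGetD data i "", PySem.List.pyGetD data j "")
            match edges.get? key with
            | some inner =>
              match inner.get? "weight" with
              | some w => edges.insert key (inner.insert "weight" (w + 1))
              | none => edges.insert key ((PySem.Dict.empty : PySem.Dict String Int).insert "weight" 1)
            | none => edges.insert key ((PySem.Dict.empty : PySem.Dict String Int).insert "weight" 1)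
          ) edges) edges
      else edges) PySem.Dict.empty
  edges.items.map (fun p => (p.1.1, p.1.2, p.2.items))

-- ===== PORT B =====
-- Source B's while loop: `while suffix: head = suffix[0]; for y in suffix: keys.append((head,y)); suffix = suffix[1:]`
-- (suffix[1:] of a nonempty list is its tail, so the loop is structural recursion on suffix)
def pvAltWhile : List String → List (String × String) → List (String × String)
  | [], keys => keys
  | x :: xs, keys => pvAltWhile xs (keys ++ (x :: xs).map (fun y => (x, y)))

def createEdgeListFromRaw_alt (raw : List (String × List String)) : List (String × String × List (String × Int)) :=
  let keys : List (String × String) :=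
    raw.foldl (fun keys p =>
      if PySem.List.len p.2 > 1 then pvAltWhile p.2 keys else keys) []
  let counts : PySem.Dict (String × String) Int :=
    keys.foldl (fun counts k => counts.insert k (counts.getD k 0 + 1)) PySem.Dict.empty
  counts.items.map (fun p => (p.1.1, p.1.2, [("weight", p.2)]))

-- ===== PRECONDITION & SPEC =====
def Spec_createEdgeListFromRaw (raw : List (String × List String)) (out : List (String × String × List (String × Int))) : Prop := out = createEdgeListFromRaw_alt raw
instance (raw : List (String × List String)) (out : List (String × String × List (String × Int))) : Decidable (Spec_createEdgeListFromRaw raw out) := by unfold Spec_createEdgeListFromRaw; infer_instance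

-- ===== CLAIM (what is proved, stated in full; the proofs are below) =====
def Claim_equal_createEdgeListFromRaw : Prop := ∀ (raw : List (String × List String)), Dom_createEdgeListFromRaw raw → Spec_createEdgeListFromRaw raw (createEdgeListFromRaw raw)

-- ===== LEMMAS AND PROOFS =====

-- proof-side names for the two loop bodies and the simulation between the two dict states
def pvStepA (edges : PySem.Dict (String × String) (PySem.Dict String Int)) (key : String × String) : PySem.Dict (String × String) (PySem.Dict String Int) :=
  match edges.get? key with
  | some inner =>
    match inner.get? "weight" with
    | some w => edges.insert key (inner.insert "weight" (w + 1))
    | none => edges.insert key ((PySem.Dict.empty : PySem.Dict String Int).insert "weight" 1)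
  | none => edges.insert key ((PySem.Dict.empty : PySem.Dict String Int).insert "weight" 1)

def pvStepB (counts : PySem.Dict (String × String) Int) (pair : String × String) : PySem.Dict (String × String) Int :=
  counts.insert pair (counts.getD pair 0 + 1)

def pvWd (n : Int) : PySem.Dict String Int := PySem.Dict.mk [("weight", n)]

def pvLift (C : PySem.Dict (String × String) Int) : PySem.Dict (String × String) (PySem.Dict String Int) :=
  PySem.Dict.mk (C.items.map (fun p => (p.1, pvWd p.2)))

-- the flat list of keys a group contributes, in A's (and B's) iteration order
def pvPairs : List String → List (String × String)
  | [] => []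
  | x :: xs => (x :: xs).map (fun y => (x, y)) ++ pvPairs xs

-- all keys contributed by all qualifying groups, in order
def pvKeys (raw : List (String × List String)) : List (String × String) :=
  raw.flatMap (fun p => if PySem.List.len p.2 > 1 then pvPairs p.2 else [])

theorem pvAltWhile_eq (s : List String) (keys : List (String × String)) :
    pvAltWhile s keys = keys ++ pvPairs s := by
  induction s generalizing keys with
  | nil => simp [pvAltWhile, pvPairs]
  | cons x xs ih => simp [pvAltWhile, pvPairs, ih, List.append_assoc]

theorem pvKeysLoop_eq (raw : List (String × List String)) (ks : List (String × String)) :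
    raw.foldl (fun keys p => if PySem.List.len p.2 > 1 then pvAltWhile p.2 keys else keys) ks
    = ks ++ pvKeys raw := by
  induction raw generalizing ks with
  | nil => simp [pvKeys]
  | cons p raw ih =>
    rw [List.foldl_cons]
    have hkeys : pvKeys (p :: raw)
        = (if PySem.List.len p.2 > 1 then pvPairs p.2 else []) ++ pvKeys raw := by
      simp only [pvKeys, List.flatMap_cons]
    rw [hkeys]
    by_cases h : PySem.List.len p.2 > 1
    · rw [if_pos h, if_pos h, pvAltWhile_eq, ih, List.append_assoc]
    · rw [if_neg h, if_neg h, ih, List.nil_append]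

theorem pvGet?_lift (C : PySem.Dict (String × String) Int) (k : String × String) :
    (pvLift C).get? k = (C.get? k).map pvWd := by
  obtain ⟨items⟩ := C
  induction items with
  | nil => rfl
  | cons p rest ih =>
    obtain ⟨pk, pv⟩ := p
    simp only [pvLift, List.map_cons, PySem.Dict.get?_mk_cons]
    by_cases h : (pk == k) = true
    · simp [h]
    · simp only [h]
      exact ih

theorem pvContains_lift (C : PySem.Dict (String × String) Int) (k : String × String) :
    (pvLift C).contains k = C.contains k := by
  simp [PySem.Dict.contains, pvLift, List.any_map, Function.comp_def]

theorem pvLift_insert (C : PySem.Dict (String × String) Int) (k : String × String) (v : Int) :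
    pvLift (C.insert k v) = (pvLift C).insert k (pvWd v) := by
  apply PySem.Dict.ext
  rw [PySem.Dict.items_insert]
  rw [pvContains_lift]
  by_cases h : C.contains k = true
  · simp only [h, if_true, pvLift, PySem.Dict.items_insert, List.map_map]
    apply List.map_congr_left
    intro p _
    by_cases hp : p.1 = k <;> simp [hp]
  · simp only [Bool.not_eq_true] at h
    simp [h, pvLift, PySem.Dict.items_insert]

theorem pvStep_comm (C : PySem.Dict (String × String) Int) (k : String × String) :
    pvStepA (pvLift C) k = pvLift (pvStepB C k) := by
  unfold pvStepA pvStepB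
  rw [pvGet?_lift]
  rw [PySem.Dict.getD_eq_get?_getD]
  cases h : C.get? k with
  | none =>
    simp only [Option.map_none, Option.getD]
    rw [pvLift_insert]
    rfl
  | some n =>
    simp only [Option.map_some, Option.getD]
    have hw : (pvWd n).get? "weight" = some n := by
      simp [pvWd, PySem.Dict.get?_mk_cons]
    simp only [hw]
    rw [pvLift_insert]
    have : (pvWd n).insert "weight" (n + 1) = pvWd (n + 1) := by
      apply PySem.Dict.ext
      simp [pvWd, PySem.Dict.items_insert, PySem.Dict.contains]
    rw [this]

theorem pvFold_comm (L : List (String × String)) (C : PySem.Dict (String × String) Int) :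
    L.foldl pvStepA (pvLift C) = pvLift (L.foldl pvStepB C) := by
  induction L generalizing C with
  | nil => rfl
  | cons k L ih => simp only [List.foldl_cons, pvStep_comm]; exact ih (pvStepB C k)

-- A's per-group double index loop is the fold of pvStepA over pvPairs
theorem pvGroupA_aux (data : List String) (suf : List String) (k : Nat)
    (h : data.drop k = suf) (E : PySem.Dict (String × String) (PySem.Dict String Int)) :
    (PySem.List.pyRange (k : Int) (PySem.List.len data) 1).foldl (fun E i =>
      (PySem.List.pyRange i (PySem.List.len data) 1).foldl (fun E j =>
        pvStepA E (PySem.List.pyGetD data i "", PySem.List.pyGetD data j "")) E) E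
    = (pvPairs suf).foldl pvStepA E := by
  induction suf generalizing k E with
  | nil =>
    have hk : data.length ≤ k := List.drop_eq_nil_iff.mp h
    rw [PySem.List.pyRange_one_eq_nil (by simp [PySem.List.len]; exact_mod_cast hk)]
    rfl
  | cons x suf ih =>
    have hk : k < data.length := by
      by_contra hge
      rw [List.drop_eq_nil_iff.mpr (Nat.le_of_not_lt hge)] at h
      simp at h
    have hx : PySem.List.pyGetD data (k : Int) "" = x := by
      rw [PySem.List.pyGetD_natCast]
      have h0 : (data.drop k)[0]? = some x := by rw [h]; rfl
      rw [List.getElem?_drop, Nat.add_zero] at h0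
      simp [List.getD, h0]
    rw [PySem.List.pyRange_one_cons (by simp [PySem.List.len]; exact_mod_cast hk)]
    rw [List.foldl_cons]
    have hinner :
        (PySem.List.pyRange (k : Int) (PySem.List.len data) 1).foldl (fun E j =>
          pvStepA E (PySem.List.pyGetD data (k : Int) "", PySem.List.pyGetD data j "")) E
        = ((x :: suf).map (fun y => (x, y))).foldl pvStepA E := by
      rw [PySem.List.foldl_pyRange_pyGetD data ""
        (fun E y => pvStepA E (PySem.List.pyGetD data (k : Int) "", y)) E (by positivity)]
      rw [Int.toNat_natCast, h, hx, List.foldl_map]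
    rw [hinner, pvPairs, List.foldl_append]
    have hdrop : data.drop (k + 1) = suf := by
      have h1 := congrArg (List.drop 1) h
      rwa [List.drop_drop, List.drop_one, List.tail_cons] at h1
    have := ih (k + 1) hdrop (((x :: suf).map (fun y => (x, y))).foldl pvStepA E)
    rw [← this]
    norm_cast

-- A's whole loop over raw, in simulated flat-counter form, is the fold of pvStepB over pvKeys
theorem pvMain (raw : List (String × List String)) (C : PySem.Dict (String × String) Int) :
    raw.foldl (fun edges p =>
      let data := p.2
      if PySem.List.len data > 1 then
        (PySem.List.pyRange 0 (PySem.List.len data) 1).foldl (fun edges i =>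
          (PySem.List.pyRange i (PySem.List.len data) 1).foldl (fun edges j =>
            pvStepA edges (PySem.List.pyGetD data i "", PySem.List.pyGetD data j "")) edges) edges
      else edges) (pvLift C)
    = pvLift ((pvKeys raw).foldl pvStepB C) := by
  induction raw generalizing C with
  | nil => rfl
  | cons p raw ih =>
    simp only [List.foldl_cons, pvKeys, List.flatMap_cons, List.foldl_append]
    by_cases hlen : PySem.List.len p.2 > 1
    · simp only [hlen, if_true]
      have hA := pvGroupA_aux p.2 p.2 0 (by simp) (pvLift C)
      simp only [Nat.cast_zero] at hA
      rw [hA, pvFold_comm]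
      exact ih _
    · simp only [hlen, if_false, List.foldl_nil]
      exact ih C

theorem pvPorts_eq (raw : List (String × List String)) :
    createEdgeListFromRaw raw = createEdgeListFromRaw_alt raw := by
  have h := pvMain raw PySem.Dict.empty
  show (raw.foldl (fun edges p =>
      let data := p.2
      if PySem.List.len data > 1 then
        (PySem.List.pyRange 0 (PySem.List.len data) 1).foldl (fun edges i =>
          (PySem.List.pyRange i (PySem.List.len data) 1).foldl (fun edges j =>
            pvStepA edges (PySem.List.pyGetD data i "", PySem.List.pyGetD data j "")) edges) edges
      else edges) (pvLift PySem.Dict.empty)).items.map (fun p => (p.1.1, p.1.2, p.2.items))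
    = ((raw.foldl (fun keys p =>
        if PySem.List.len p.2 > 1 then pvAltWhile p.2 keys else keys) []).foldl
          pvStepB PySem.Dict.empty).items.map (fun p => (p.1.1, p.1.2, [("weight", p.2)]))
  rw [h, pvKeysLoop_eq, List.nil_append]
  generalize ((pvKeys raw).foldl pvStepB PySem.Dict.empty) = C
  simp [pvLift, List.map_map, Function.comp, pvWd]

-- ===== VERDICT (by name: the statement is the Claim_ definition above) =====
theorem createEdgeListFromRaw_spec : Claim_equal_createEdgeListFromRaw := by
  intro raw _
  unfold Spec_createEdgeListFromRaw
  exact pvPorts_eq raw
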